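-- pv_equiv track=rewrite | github.com/hdavis2100/Real-Time-Website-Analytics | historical/historical_ingest/normalize.py | position_for_seat
-- ===== SOURCE A (Python) =====
-- POSITION_LABELS_6MAX = ["BTN", "SB", "BB", "UTG", "HJ", "CO"]
--
-- def position_for_seat(seat: int | None, button_seat: int = 1) -> str:
--     if seat is None:
--         return "UNKNOWN"
--     try:
--         normalized_seat = int(seat)
--     except (TypeError, ValueError):
--         return "UNKNOWN"
--     if not 1 <= normalized_seat <= 6:
--         return "UNKNOWN"
--     button = button_seat if 1 <= button_seat <= 6 else 1
--     order = [((button - 1 + offset) % 6) + 1 for offset in range(6)]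
--     return POSITION_LABELS_6MAX[order.index(normalized_seat)]
-- ===== SOURCE B (Python) =====
-- LABEL_BY_OFFSET = {0: "BTN", 1: "SB", 2: "BB", 3: "UTG", 4: "HJ", 5: "CO"}
--
-- def position_for_seat(seat, button_seat=1):
--     # int(None) raises TypeError, so one try covers the None guard too.
--     try:
--         s = int(seat)
--     except (TypeError, ValueError):
--         return "UNKNOWN"
--     if 1 <= s <= 6:
--         b = button_seat if 1 <= button_seat <= 6 else 1
--         return LABEL_BY_OFFSET[(s - b) % 6]
--     return "UNKNOWN"
-- ===== Notes on version B (the rewrite author's own statement) =====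
-- stated objective: simpler
-- what changed: Drops the rotated order-list build and order.index linear scan in favour of a direct dictionary lookup keyed by the closed-form offset (seat - button) % 6, and folds the None guard into the int() try.
import Mathlib
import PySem

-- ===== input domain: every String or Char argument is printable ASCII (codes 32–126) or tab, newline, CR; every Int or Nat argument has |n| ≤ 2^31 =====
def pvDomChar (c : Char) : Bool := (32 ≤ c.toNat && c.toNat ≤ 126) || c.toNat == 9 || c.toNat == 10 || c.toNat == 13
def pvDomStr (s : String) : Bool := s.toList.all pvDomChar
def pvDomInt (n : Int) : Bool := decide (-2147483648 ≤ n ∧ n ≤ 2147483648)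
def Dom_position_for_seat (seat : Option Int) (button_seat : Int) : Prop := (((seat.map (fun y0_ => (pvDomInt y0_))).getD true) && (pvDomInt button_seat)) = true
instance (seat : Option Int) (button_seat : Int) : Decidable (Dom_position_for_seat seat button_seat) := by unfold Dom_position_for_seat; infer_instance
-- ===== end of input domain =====

-- ===== PORT A =====
-- B replaces A's rotated-order list build + order.index scan by a dict lookup at the closed-form offset (seat - button) % 6 (objective: simpler).
def POSITION_LABELS_6MAX : List String := ["BTN", "SB", "BB", "UTG", "HJ", "CO"]

def position_for_seat (seat : Option Int) (button_seat : Int) : String :=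
  match seat with
  | none => "UNKNOWN"
  | some normalized_seat =>
    if ¬ (1 ≤ normalized_seat ∧ normalized_seat ≤ 6) then "UNKNOWN"
    else
      let button : Int := if 1 ≤ button_seat ∧ button_seat ≤ 6 then button_seat else 1
      let order : List Int :=
        (PySem.List.pyRange 0 6 1).map (fun offset => (PySem.Int.mod (button - 1 + offset) 6) + 1)
      -- order.index(normalized_seat) always succeeds here; Python would raise ValueError otherwise
      match PySem.List.index? order normalized_seat with
      | some i => (PySem.List.pyGet? POSITION_LABELS_6MAX (Int.ofNat i)).getD ""
      | none => ""

-- ===== PORT B =====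
def LABEL_BY_OFFSET : PySem.Dict Int String :=
  PySem.Dict.ofList [(0, "BTN"), (1, "SB"), (2, "BB"), (3, "UTG"), (4, "HJ"), (5, "CO")]

-- In Source B, int(None) raises TypeError (caught → "UNKNOWN"): the none branch of elim is that catch.
def position_for_seat_alt (seat : Option Int) (button_seat : Int) : String :=
  seat.elim "UNKNOWN" fun s =>
    if 1 ≤ s ∧ s ≤ 6 then
      let b : Int := if 1 ≤ button_seat ∧ button_seat ≤ 6 then button_seat else 1
      (LABEL_BY_OFFSET.get? (PySem.Int.mod (s - b) 6)).getD ""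
    else "UNKNOWN"

-- ===== PRECONDITION & SPEC =====
def Spec_position_for_seat (seat : Option Int) (button_seat : Int) (out : String) : Prop := out = position_for_seat_alt seat button_seat
instance (seat : Option Int) (button_seat : Int) (out : String) : Decidable (Spec_position_for_seat seat button_seat out) := by unfold Spec_position_for_seat; infer_instance

-- ===== CLAIM (what is proved, stated in full; the proofs are below) =====
def Claim_equal_position_for_seat : Prop := ∀ (seat : Option Int) (button_seat : Int), Dom_position_for_seat seat button_seat → Spec_position_for_seat seat button_seat (position_for_seat seat button_seat)

-- ===== LEMMAS AND PROOFS =====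

-- For seat and button both in 1..6 the two bodies agree (36 closed cases).
theorem pv_core (s b : Int) (hs1 : 1 ≤ s) (hs6 : s ≤ 6) (hb1 : 1 ≤ b) (hb6 : b ≤ 6) :
    position_for_seat (some s) b = position_for_seat_alt (some s) b := by
  interval_cases s <;> interval_cases b <;> decide

-- ===== VERDICT (by name: the statement is the Claim_ definition above) =====
theorem position_for_seat_spec : Claim_equal_position_for_seat := by
  intro seat button_seat _
  unfold Spec_position_for_seat
  cases seat with
  | none => rfl
  | some s =>
    by_cases hs : 1 ≤ s ∧ s ≤ 6
    · by_cases hb : 1 ≤ button_seat ∧ button_seat ≤ 6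
      · exact pv_core s button_seat hs.1 hs.2 hb.1 hb.2
      · have h1 : position_for_seat (some s) button_seat = position_for_seat (some s) 1 := by
          simp [position_for_seat, hs, hb]
        have h2 : position_for_seat_alt (some s) button_seat = position_for_seat_alt (some s) 1 := by
          simp [position_for_seat_alt, hs, hb]
        rw [h1, h2]
        exact pv_core s 1 hs.1 hs.2 (by norm_num) (by norm_num)
    · simp [position_for_seat, position_for_seat_alt, hs, Option.elim]
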